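-- pv_equiv track=rewrite | github.com/KimPopsong/PROGRAMMERS | 147354.py | solution
-- ===== SOURCE A (Python) =====
-- def solution(data, col, row_begin, row_end):
--     data = sorted(data, key=lambda x: x[0], reverse=True)  # 첫 번째 값으로 내림차순 정렬을 한 뒤
--     data = sorted(data, key=lambda x: x[col - 1])  # col의 값으로 오름차순 정렬
--
--     dataS = []
--
--     for i in range(len(data)):
--         temp = 0
--
--         for d in data[i]:
--             temp = temp + (d % (i + 1))
--         dataS.append(temp)
--
--     answer = 0
--     for i in range(row_begin - 1, row_end):
--         answer = answer ^ dataS[i]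
--
--     return answer
-- ===== SOURCE B (Python) =====
-- def solution(data, col, row_begin, row_end):
--     # Prefix-XOR decomposition: after the two stable sorts, build the running
--     # XOR of the modular row sums for ALL rows once (prefix[k] = XOR of rows 0..k-1),
--     # then answer any row window by XOR-cancellation of two prefix entries.
--     data = sorted(data, key=lambda x: x[0], reverse=True)
--     data = sorted(data, key=lambda x: x[col - 1])
--     prefix = [0]
--     acc = 0
--     for i, row in enumerate(data):
--         acc ^= sum(d % (i + 1) for d in row)
--         prefix.append(acc)
--     lo = row_begin - 1
--     return prefix[lo] ^ prefix[row_end] if lo < row_end else 0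
-- ===== Notes on version B (the rewrite author's own statement) =====
-- stated objective: alternative
-- what changed: B keeps the two stable sorts but replaces A's precomputed row-sum list plus per-window XOR loop by a prefix-XOR table: one pass builds the running XOR of all modular row sums, and the window answer is the XOR-cancellation of two prefix entries, with no loop over the window at query time.
-- outside the precondition, e.g. on solution([[1], [-6], [8]], 1, -1, -1): A returns 1, B returns 2; on solution([[1, 2]], 1, 1, 3): A raises IndexError, B raises IndexError
import Mathlib
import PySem

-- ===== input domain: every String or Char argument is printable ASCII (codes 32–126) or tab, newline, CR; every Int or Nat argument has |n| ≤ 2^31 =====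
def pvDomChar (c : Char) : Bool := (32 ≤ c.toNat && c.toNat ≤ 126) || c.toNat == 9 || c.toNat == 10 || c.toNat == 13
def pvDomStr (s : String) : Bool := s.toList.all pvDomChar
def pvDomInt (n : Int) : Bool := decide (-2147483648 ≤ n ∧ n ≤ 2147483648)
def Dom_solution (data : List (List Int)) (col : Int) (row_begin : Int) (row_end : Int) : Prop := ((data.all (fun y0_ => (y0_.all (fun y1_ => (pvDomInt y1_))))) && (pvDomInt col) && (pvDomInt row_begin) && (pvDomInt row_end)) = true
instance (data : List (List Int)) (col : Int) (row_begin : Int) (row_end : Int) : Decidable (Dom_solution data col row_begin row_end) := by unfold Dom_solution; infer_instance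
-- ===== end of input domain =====

-- B replaces A's per-window XOR of a precomputed row-sum list by a prefix-XOR table:
-- it builds the running XOR of all modular row sums once and answers the window by
-- XOR-cancellation of two prefix entries; objective: alternative decomposition.

-- ===== PORT A =====
-- Indexing (sort keys row[0], row[col-1]; data[i]; dataS[i]) is done with pyGetD _ _ default:
-- under Pre_solution every such index is in Python range, so the default is never taken and
-- the port is exact there (out of range, Python raises and Pre_ excludes the input).
def solution (data : List (List Int)) (col : Int) (row_begin : Int) (row_end : Int) : Int :=
  let data1 := PySem.List.sorted data (fun x => PySem.List.pyGetD x 0 0) true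
  let data2 := PySem.List.sorted data1 (fun x => PySem.List.pyGetD x (col - 1) 0) false
  let dataS := (PySem.List.pyRange 0 (data2.length : Int) 1).foldl
      (fun acc i =>
        acc ++ [(PySem.List.pyGetD data2 i []).foldl
                  (fun temp d => temp + PySem.Int.mod d (i + 1)) 0]) []
  (PySem.List.pyRange (row_begin - 1) row_end 1).foldl
      (fun answer i => PySem.Int.bxor answer (PySem.List.pyGetD dataS i 0)) 0

-- ===== PORT B =====
-- Same indexing convention as port A (exact under Pre_solution); the for-loop over
-- enumerate(data) carries the pair (prefix list, running xor acc) as its state.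
def solution_alt (data : List (List Int)) (col : Int) (row_begin : Int) (row_end : Int) : Int :=
  let data1 := PySem.List.sorted data (fun x => PySem.List.pyGetD x 0 0) true
  let data2 := PySem.List.sorted data1 (fun x => PySem.List.pyGetD x (col - 1) 0) false
  let st := (PySem.List.enumerate data2 0).foldl
      (fun (st : List Int × Int) p =>
        let acc' := PySem.Int.bxor st.2
          (p.2.foldl (fun s d => s + PySem.Int.mod d (p.1 + 1)) 0)
        (st.1 ++ [acc'], acc'))
      ([0], 0)
  let lo := row_begin - 1
  if lo < row_end then
    PySem.Int.bxor (PySem.List.pyGetD st.1 lo 0) (PySem.List.pyGetD st.1 row_end 0)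
  else 0

-- ===== PRECONDITION & SPEC =====
-- Pre_ excludes (a) inputs where A raises: a sort key out of range (IndexError on row[0] or
-- row[col-1]) or a non-empty window reaching past the end of dataS (IndexError); and (b) the
-- defensible-corner inputs where A returns only via Python's negative-index wraparound into
-- dataS (row_begin ≤ 0 with a non-empty window): B's prefix table is indexed with those
-- negative positions too and wraps to different entries there.
def Pre_solution (data : List (List Int)) (col : Int) (row_begin : Int) (row_end : Int) : Prop :=
  (∀ row ∈ data, PySem.Raise.InRange row.length 0 ∧ PySem.Raise.InRange row.length (col - 1)) ∧
  (row_begin - 1 < row_end → 1 ≤ row_begin ∧ row_end ≤ (data.length : Int))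
instance (data : List (List Int)) (col : Int) (row_begin : Int) (row_end : Int) : Decidable (Pre_solution data col row_begin row_end) := by unfold Pre_solution; infer_instance

def pvWitness_solution : List (List Int) × Int × Int × Int := ([[2, 3], [1, 5]], 1, 1, 2)

def Spec_solution (data : List (List Int)) (col : Int) (row_begin : Int) (row_end : Int) (out : Int) : Prop := out = solution_alt data col row_begin row_end
instance (data : List (List Int)) (col : Int) (row_begin : Int) (row_end : Int) (out : Int) : Decidable (Spec_solution data col row_begin row_end out) := by unfold Spec_solution; infer_instance

-- ===== CLAIM (what is proved, stated in full; the proofs are below) =====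
def Claim_equal_solution : Prop := ∀ (data : List (List Int)) (col : Int) (row_begin : Int) (row_end : Int), Dom_solution data col row_begin row_end → Pre_solution data col row_begin row_end → Spec_solution data col row_begin row_end (solution data col row_begin row_end)

-- ===== LEMMAS AND PROOFS =====

-- modular sum of the row at (possibly shared) index i of the sorted data
def pvS (data2 : List (List Int)) (i : Int) : Int :=
  (PySem.List.pyGetD data2 i []).foldl (fun s d => s + PySem.Int.mod d (i + 1)) 0

-- the XOR-fold step of A's final loop, expressed on row indices
def pvG (data2 : List (List Int)) (ans i : Int) : Int := PySem.Int.bxor ans (pvS data2 i)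

-- prefix XOR of the first k row sums
def pvF (data2 : List (List Int)) (k : Int) : Int :=
  (PySem.List.pyRange 0 k 1).foldl (pvG data2) 0

theorem pv_bxor_assoc (a b c : Int) :
    PySem.Int.bxor (PySem.Int.bxor a b) c = PySem.Int.bxor a (PySem.Int.bxor b c) := by
  unfold PySem.Int.bxor
  split_ifs <;> simp_all [Int.toNat_natCast, Nat.xor_assoc] <;> omega

theorem pv_zero_bxor (a : Int) : PySem.Int.bxor 0 a = a := by
  rw [PySem.Int.bxor_comm]; exact PySem.Int.bxor_zero a

theorem pv_foldl_g_bxor (data2 : List (List Int)) (l : List Int) :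
    ∀ x y : Int, l.foldl (pvG data2) (PySem.Int.bxor x y) =
      PySem.Int.bxor x (l.foldl (pvG data2) y) := by
  induction l with
  | nil => intro x y; rfl
  | cons i t ih =>
      intro x y
      simp only [List.foldl_cons, pvG, pv_bxor_assoc]
      exact ih x (PySem.Int.bxor y (pvS data2 i))

theorem pv_foldl_g_init (data2 : List (List Int)) (l : List Int) (x : Int) :
    l.foldl (pvG data2) x = PySem.Int.bxor x (l.foldl (pvG data2) 0) := by
  have := pv_foldl_g_bxor data2 l x 0
  rwa [PySem.Int.bxor_zero] at this

-- the pair-state fold of port B builds exactly the table of prefix XORs pvF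
theorem pv_prefix_build (data2 : List (List Int)) (m : Nat) :
    (((PySem.List.pyRange 0 (m : Int) 1).map
        (fun j => (j, PySem.List.pyGetD data2 j ([] : List Int)))).foldl
      (fun (st : List Int × Int) p =>
        (st.1 ++ [PySem.Int.bxor st.2 (p.2.foldl (fun s d => s + PySem.Int.mod d (p.1 + 1)) 0)],
         PySem.Int.bxor st.2 (p.2.foldl (fun s d => s + PySem.Int.mod d (p.1 + 1)) 0)))
      ([0], 0))
    = ((PySem.List.pyRange 0 ((m : Int) + 1) 1).map (pvF data2), pvF data2 (m : Int)) := by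
  induction m with
  | zero =>
      rw [Nat.cast_zero, PySem.List.pyRange_one_eq_nil (le_refl (0 : Int)),
          PySem.List.pyRange_one_singleton]
      simp [pvF, PySem.List.pyRange_one_eq_nil (le_refl (0 : Int))]
  | succ m ih =>
      have h1 : ((m + 1 : Nat) : Int) = (m : Int) + 1 := by push_cast; ring
      have h2 : PySem.List.pyRange 0 ((m : Int) + 1) 1 =
          PySem.List.pyRange 0 (m : Int) 1 ++ [(m : Int)] :=
        PySem.List.pyRange_one_succ_right (by positivity)
      have h3 : PySem.List.pyRange 0 ((m : Int) + 1 + 1) 1 =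
          PySem.List.pyRange 0 ((m : Int) + 1) 1 ++ [(m : Int) + 1] :=
        PySem.List.pyRange_one_succ_right (by positivity)
      have hF : pvF data2 ((m : Int) + 1) =
          PySem.Int.bxor (pvF data2 (m : Int)) (pvS data2 (m : Int)) := by
        unfold pvF
        rw [h2, List.foldl_append]
        rfl
      rw [h1, h2, List.map_append, List.foldl_append, ih, h3, List.map_append]
      simp only [List.map_cons, List.map_nil, List.foldl_cons, List.foldl_nil]
      rw [hF]
      rfl

-- A's dataS list is the map of pvS over the row indices
theorem pv_dataS_eq_map (data2 : List (List Int)) :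
    (PySem.List.pyRange 0 (data2.length : Int) 1).foldl
      (fun acc i =>
        acc ++ [(PySem.List.pyGetD data2 i []).foldl
                  (fun temp d => temp + PySem.Int.mod d (i + 1)) 0]) []
    = (PySem.List.pyRange 0 (data2.length : Int) 1).map (pvS data2) := by
  rw [PySem.List.foldl_append_singleton_eq_map, List.nil_append]
  rfl

-- core equivalence on the already-sorted list, window in range (or empty)
theorem pv_core (data2 : List (List Int)) (lo hi : Int)
    (hwin : lo < hi → 0 ≤ lo ∧ hi ≤ (data2.length : Int)) :
    (PySem.List.pyRange lo hi 1).foldl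
      (fun answer i =>
        PySem.Int.bxor answer
          (PySem.List.pyGetD
            ((PySem.List.pyRange 0 (data2.length : Int) 1).map (pvS data2)) i 0)) 0
    = (if lo < hi then
        PySem.Int.bxor
          (PySem.List.pyGetD ((PySem.List.pyRange 0 ((data2.length : Int) + 1) 1).map (pvF data2)) lo 0)
          (PySem.List.pyGetD ((PySem.List.pyRange 0 ((data2.length : Int) + 1) 1).map (pvF data2)) hi 0)
      else 0) := by
  by_cases h : lo < hi
  · obtain ⟨hlo, hhi⟩ := hwin h
    rw [if_pos h]
    have hA : (PySem.List.pyRange lo hi 1).foldl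
        (fun answer i =>
          PySem.Int.bxor answer
            (PySem.List.pyGetD
              ((PySem.List.pyRange 0 (data2.length : Int) 1).map (pvS data2)) i 0)) 0
        = (PySem.List.pyRange lo hi 1).foldl (pvG data2) 0 := by
      apply PySem.List.foldl_congr_mem
      intro acc i hi'
      rw [PySem.List.mem_pyRange_one] at hi'
      rw [PySem.List.pyGetD_map_pyRange_of_nonneg _ _ _ _ (by omega) (by omega)]
      rfl
    rw [hA,
        PySem.List.pyGetD_map_pyRange_of_nonneg _ _ _ _ (by omega) (by omega),
        PySem.List.pyGetD_map_pyRange_of_nonneg _ _ _ _ (by omega) (by omega)]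
    have hsplit : pvF data2 hi =
        PySem.Int.bxor (pvF data2 lo) ((PySem.List.pyRange lo hi 1).foldl (pvG data2) 0) := by
      unfold pvF
      rw [PySem.List.pyRange_one_append 0 lo hi hlo (le_of_lt h), List.foldl_append,
          pv_foldl_g_init data2 (PySem.List.pyRange lo hi 1)]
    rw [hsplit, ← pv_bxor_assoc, PySem.Int.bxor_self, pv_zero_bxor]
  · rw [if_neg h, PySem.List.pyRange_one_eq_nil (show hi ≤ lo by omega)]
    rfl

theorem solution_eq_alt (data : List (List Int)) (col row_begin row_end : Int)
    (hpre : Pre_solution data col row_begin row_end) :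
    solution data col row_begin row_end = solution_alt data col row_begin row_end := by
  obtain ⟨-, hwin⟩ := hpre
  unfold solution solution_alt
  dsimp only
  set data2 := PySem.List.sorted
      (PySem.List.sorted data (fun x => PySem.List.pyGetD x 0 0) true)
      (fun x => PySem.List.pyGetD x (col - 1) 0) false with hd2
  have hlen : (data2.length : Int) = (data.length : Int) := by
    rw [hd2, PySem.List.length_sorted, PySem.List.length_sorted]
  rw [pv_dataS_eq_map data2,
      PySem.List.enumerate_eq_map_pyRange data2 ([] : List Int),
      show PySem.List.len data2 = (data2.length : Int) from rfl,
      pv_prefix_build data2 data2.length]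
  have := pv_core data2 (row_begin - 1) row_end
    (fun h => by have := hwin h; constructor <;> omega)
  simpa using this

-- ===== VERDICT (by name: the statement is the Claim_ definition above) =====
theorem solution_spec : Claim_equal_solution := by
  intro data col row_begin row_end _ hpre
  exact solution_eq_alt data col row_begin row_end hpre
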